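-- pv_equiv track=rewrite | github.com/igotyabingo/codingtest | Python3/프로그래머스/2/87390. n＾2 배열 자르기/n＾2 배열 자르기.py | solution
-- ===== SOURCE A (Python) =====
-- def solution(n, left, right):
--     answer = []
--
--     for i in range(left+1, right+2):
--         a, b = i//n + 1, i%n
--         if b==0:
--           b=n
--           a-=1
--         answer.append(max(a, b))
--
--     return answer
-- ===== SOURCE B (Python) =====
-- def solution(n, left, right):
--     # Row-run construction: split [left, right] into row spans of the n x n
--     # staircase array and emit each row as a constant run followed by an
--     # increasing run, instead of computing max per element.
--     if right < left:
--         return []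
--     start_row, start_col = divmod(left, n)
--     end_row, end_col = divmod(right, n)
--     out = []
--     for r in range(start_row, end_row + 1):
--         lo = start_col if r == start_row else 0
--         hi = end_col if r == end_row else n - 1
--         # columns lo..hi of row r hold max(r, c) + 1
--         flat = min(hi, r)            # columns lo..flat (if any) are r + 1
--         if flat >= lo:
--             out.extend([r + 1] * (flat - lo + 1))
--         out.extend(range(max(lo, r + 1) + 1, hi + 2))
--     return out
-- ===== Notes on version B (the rewrite author's own statement) =====
-- stated objective: alternative
-- what changed: A computes max(i//n+1, i%n) element by element with a b==0 fixup over the flat index range; B decomposes [left,right] into row spans via divmod and emits each row as a constant run (replicate) plus an increasing run (range), never calling max per element.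
-- outside the precondition, e.g. on solution(-3, 0, 5): A returns [0, 0, -1, -1, -1, -2], B returns []
import Mathlib
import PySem

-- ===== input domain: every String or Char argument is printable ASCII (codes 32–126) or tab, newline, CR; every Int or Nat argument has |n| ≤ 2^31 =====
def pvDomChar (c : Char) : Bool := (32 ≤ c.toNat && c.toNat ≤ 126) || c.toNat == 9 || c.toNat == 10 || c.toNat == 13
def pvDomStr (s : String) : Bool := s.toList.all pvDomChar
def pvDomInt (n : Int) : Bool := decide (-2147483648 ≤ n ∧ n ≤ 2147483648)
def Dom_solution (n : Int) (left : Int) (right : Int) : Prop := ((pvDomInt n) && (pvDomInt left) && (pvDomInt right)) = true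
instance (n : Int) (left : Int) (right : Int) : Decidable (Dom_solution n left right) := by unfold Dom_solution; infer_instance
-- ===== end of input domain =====

-- B builds the slice row by row as constant+increasing runs instead of A's per-element max over the flat index range; equal returns proved for n ≥ 1.

-- ===== PORT A =====
def solution (n : Int) (left : Int) (right : Int) : List Int :=
  (PySem.List.pyRange (left + 1) (right + 2) 1).foldl (fun answer i =>
    let a := PySem.Int.floordiv i n + 1
    let b := PySem.Int.mod i n
    let p := if b = 0 then (a - 1, n) else (a, b)
    answer ++ [max p.1 p.2]) []

-- ===== PORT B =====
def solution_alt (n : Int) (left : Int) (right : Int) : List Int :=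
  if right < left then []
  else
    let sr := PySem.Int.floordiv left n
    let sc := PySem.Int.mod left n
    let er := PySem.Int.floordiv right n
    let ec := PySem.Int.mod right n
    (PySem.List.pyRange sr (er + 1) 1).foldl (fun out r =>
      let lo := if r = sr then sc else 0
      let hi := if r = er then ec else n - 1
      let flat := min hi r
      let out := if flat ≥ lo then out ++ List.replicate (flat - lo + 1).toNat (r + 1) else out
      out ++ PySem.List.pyRange (max lo (r + 1) + 1) (hi + 2) 1) []

-- ===== PRECONDITION & SPEC =====
-- Pre_ restricts to the problem's natural domain n ≥ 1 (an n×n array): at n = 0 A raises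
-- ZeroDivisionError, and for n < 0 A's values are floor-division artefacts outside the task.
def Pre_solution (n : Int) (left : Int) (right : Int) : Prop := 0 < n
instance (n : Int) (left : Int) (right : Int) : Decidable (Pre_solution n left right) := by unfold Pre_solution; infer_instance
def pvWitness_solution : Int × Int × Int := (3, 2, 5)

def Spec_solution (n : Int) (left : Int) (right : Int) (out : List Int) : Prop := out = solution_alt n left right
instance (n : Int) (left : Int) (right : Int) (out : List Int) : Decidable (Spec_solution n left right out) := by unfold Spec_solution; infer_instance

-- ===== CLAIM (what is proved, stated in full; the proofs are below) =====
def Claim_equal_solution : Prop := ∀ (n : Int) (left : Int) (right : Int), Dom_solution n left right → Pre_solution n left right → Spec_solution n left right (solution n left right)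

-- ===== LEMMAS AND PROOFS =====

-- the common value of cell j (flat index) of the n×n staircase array
def pvCell (n j : Int) : Int := max (PySem.Int.floordiv j n) (PySem.Int.mod j n) + 1

theorem pvCell_step (n j : Int) (hn : 0 < n) :
    (let a := PySem.Int.floordiv (j + 1) n + 1
     let b := PySem.Int.mod (j + 1) n
     let p := if b = 0 then (a - 1, n) else (a, b)
     max p.1 p.2) = pvCell n j := by
  have hq := Int.mul_ediv_add_emod j n
  have hs0 : 0 ≤ j % n := Int.emod_nonneg j (ne_of_gt hn)
  have hsn : j % n < n := Int.emod_lt_of_pos j hn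
  simp only [pvCell, PySem.Int.floordiv_eq_ediv_of_pos hn, PySem.Int.mod_eq_emod_of_pos hn]
  by_cases hlast : j % n = n - 1
  · have hdist : n * (j / n + 1) = n * (j / n) + n := by ring
    have h1 : (j + 1) / n = j / n + 1 ∧ (j + 1) % n = 0 := by
      rw [Int.ediv_emod_unique hn]
      refine ⟨by omega, by omega, by omega⟩
    rw [h1.1, h1.2]
    simp
    omega
  · have h1 : (j + 1) / n = j / n ∧ (j + 1) % n = j % n + 1 := by
      rw [Int.ediv_emod_unique hn]
      refine ⟨by omega, by omega, by omega⟩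
    rw [h1.1, h1.2]
    rw [if_neg (by omega)]
    simp


theorem solution_eq_map (n l r : Int) (hn : 0 < n) :
    solution n l r = (PySem.List.pyRange l (r + 1) 1).map (pvCell n) := by
  unfold solution
  rw [PySem.List.foldl_append_singleton_eq_map]
  rw [List.nil_append]
  rw [PySem.List.pyRange_one, PySem.List.pyRange_one, List.map_map, List.map_map]
  have he : (r + 2 - (l + 1)) = (r + 1 - l) := by ring
  rw [he]
  apply List.map_congr_left
  intro k _
  simp only [Function.comp]
  have : l + 1 + (k : Int) = (l + k) + 1 := by ring
  rw [this]
  exact pvCell_step n (l + k) hn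

-- cell value inside row r, column c
theorem pvCell_row (n r c : Int) (hn : 0 < n) (h0 : 0 ≤ c) (h1 : c < n) :
    pvCell n (r * n + c) = max r c + 1 := by
  unfold pvCell
  rw [PySem.Int.floordiv_eq_ediv_of_pos hn, PySem.Int.mod_eq_emod_of_pos hn]
  have hcomm : r * n + c = c + r * n := by ring
  rw [hcomm, Int.add_mul_ediv_right c r (ne_of_gt hn), Int.add_mul_emod_self_right,
      Int.ediv_eq_zero_of_lt h0 h1, Int.emod_eq_of_lt h0 h1]
  omega

-- a row span rendered as a constant run followed by an increasing run
theorem run_split (r hi : Int) : ∀ (k : Nat), ∀ (lo : Int), (hi + 1 - lo).toNat = k →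
    (PySem.List.pyRange lo (hi + 1) 1).map (fun c => max r c + 1)
    = (if min hi r ≥ lo then List.replicate (min hi r - lo + 1).toNat (r + 1) else [])
      ++ PySem.List.pyRange (max lo (r + 1) + 1) (hi + 2) 1 := by
  intro k
  induction k with
  | zero =>
    intro lo h0
    rw [if_neg (by omega), PySem.List.pyRange_one_eq_nil (by omega),
        PySem.List.pyRange_one_eq_nil (by omega)]
    rfl
  | succ k ih =>
    intro lo hk
    rw [PySem.List.pyRange_one_cons (by omega : lo < hi + 1), List.map_cons]
    rw [ih (lo + 1) (by omega)]
    by_cases hc : lo ≤ r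
    · have hm1 : max r lo = r := by omega
      have hm2 : max lo (r + 1) = r + 1 := by omega
      have hm3 : max (lo + 1) (r + 1) = r + 1 := by omega
      rw [hm1, hm2, hm3]
      by_cases hc2 : min hi r ≥ lo + 1
      · have hrep : (min hi r - lo + 1).toNat = (min hi r - (lo + 1) + 1).toNat + 1 := by omega
        rw [if_pos hc2, if_pos (show min hi r ≥ lo by omega), hrep, List.replicate_succ]
        simp
      · rw [if_neg hc2, if_pos (show min hi r ≥ lo by omega)]
        rw [show (min hi r - lo + 1).toNat = 1 by omega]
        simp
    · have hm1 : max r lo = lo := by omega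
      have hm2 : max lo (r + 1) = lo := by omega
      have hm3 : max (lo + 1) (r + 1) = lo + 1 := by omega
      rw [if_neg (by omega), if_neg (by omega), hm2, hm3]
      rw [PySem.List.pyRange_one_cons (by omega : lo + 1 < hi + 2)]
      simp [hm1]

-- a row's emitted segment is the cell values of its flat-index span
theorem row_eq (n r lo hi : Int) (hn : 0 < n) (h0 : 0 ≤ lo) (h1 : hi < n) :
    (if min hi r ≥ lo then List.replicate (min hi r - lo + 1).toNat (r + 1) else [])
      ++ PySem.List.pyRange (max lo (r + 1) + 1) (hi + 2) 1
    = (PySem.List.pyRange (r * n + lo) (r * n + hi + 1) 1).map (pvCell n) := by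
  rw [← run_split r hi _ lo rfl]
  rw [PySem.List.pyRange_one lo (hi + 1), PySem.List.pyRange_one (r * n + lo) (r * n + hi + 1),
      List.map_map, List.map_map]
  have he : (r * n + hi + 1 - (r * n + lo)) = (hi + 1 - lo) := by ring
  rw [he]
  apply List.map_congr_left
  intro k hmem
  rw [List.mem_range] at hmem
  simp only [Function.comp]
  have harg : r * n + lo + (k : Int) = r * n + (lo + k) := by ring
  rw [harg, pvCell_row n r (lo + k) hn (by omega) (by omega)]

-- rows strictly after the first emit full spans chaining up to flat index r+1
theorem chain (n er ec : Int) (hn : 0 < n) (hec0 : 0 ≤ ec) (hecn : ec < n) :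
    ∀ (k : Nat), ∀ (t : Int), (er + 1 - t).toNat = k → t ≤ er + 1 →
    (PySem.List.pyRange t (er + 1) 1).flatMap
        (fun rr => (PySem.List.pyRange (rr * n) (rr * n + (if rr = er then ec else n - 1) + 1) 1).map (pvCell n))
    = (PySem.List.pyRange (t * n) (er * n + ec + 1) 1).map (pvCell n) := by
  intro k
  induction k with
  | zero =>
    intro t hk ht
    have hte : t = er + 1 := by omega
    subst hte
    have hd : (er + 1) * n = er * n + n := by ring
    rw [PySem.List.pyRange_one_eq_nil (by omega),
        PySem.List.pyRange_one_eq_nil (by omega)]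
    rfl
  | succ k ih =>
    intro t hk ht
    have htl : t ≤ er := by omega
    rw [PySem.List.pyRange_one_cons (by omega : t < er + 1), List.flatMap_cons]
    rw [ih (t + 1) (by omega) (by omega)]
    have hd : (t + 1) * n = t * n + n := by ring
    by_cases hte : t = er
    · subst hte
      rw [if_pos rfl]
      rw [PySem.List.pyRange_one_eq_nil (by omega : t * n + ec + 1 ≤ (t + 1) * n)]
      simp
    · rw [if_neg hte]
      have hmul : (t + 1) * n ≤ er * n := by
        have := mul_le_mul_of_nonneg_right (by omega : t + 1 ≤ er) (le_of_lt hn)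
        linarith
      have hsplit := PySem.List.pyRange_one_append (t * n) ((t + 1) * n) (er * n + ec + 1)
        (by omega) (by omega)
      have hend : t * n + (n - 1) + 1 = (t + 1) * n := by ring
      rw [hend, hsplit, List.map_append]

theorem solution_alt_eq_map (n l r : Int) (hn : 0 < n) :
    solution_alt n l r = (PySem.List.pyRange l (r + 1) 1).map (pvCell n) := by
  unfold solution_alt
  by_cases hlr : r < l
  · rw [if_pos hlr, PySem.List.pyRange_one_eq_nil (by omega)]
    rfl
  · rw [if_neg hlr]
    have hl := PySem.Int.floordiv_mul_add_mod l n
    have hr := PySem.Int.floordiv_mul_add_mod r n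
    have hsc : 0 ≤ PySem.Int.mod l n ∧ PySem.Int.mod l n < n := by
      rw [PySem.Int.mod_eq_emod_of_pos hn]
      exact ⟨Int.emod_nonneg l (ne_of_gt hn), Int.emod_lt_of_pos l hn⟩
    have hec : 0 ≤ PySem.Int.mod r n ∧ PySem.Int.mod r n < n := by
      rw [PySem.Int.mod_eq_emod_of_pos hn]
      exact ⟨Int.emod_nonneg r (ne_of_gt hn), Int.emod_lt_of_pos r hn⟩
    have hse : PySem.Int.floordiv l n ≤ PySem.Int.floordiv r n := by
      rw [PySem.Int.floordiv_eq_ediv_of_pos hn, PySem.Int.floordiv_eq_ediv_of_pos hn]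
      exact Int.ediv_le_ediv hn (by omega)
    have hfun : (fun (out : List Int) (rr : Int) =>
        let lo := if rr = PySem.Int.floordiv l n then PySem.Int.mod l n else 0
        let hi := if rr = PySem.Int.floordiv r n then PySem.Int.mod r n else n - 1
        let flat := min hi rr
        let out := if flat ≥ lo then out ++ List.replicate (flat - lo + 1).toNat (rr + 1) else out
        out ++ PySem.List.pyRange (max lo (rr + 1) + 1) (hi + 2) 1)
        = (fun out rr => out ++
            ((if min (if rr = PySem.Int.floordiv r n then PySem.Int.mod r n else n - 1) rr ≥
                  (if rr = PySem.Int.floordiv l n then PySem.Int.mod l n else 0) then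
                List.replicate (min (if rr = PySem.Int.floordiv r n then PySem.Int.mod r n else n - 1) rr
                    - (if rr = PySem.Int.floordiv l n then PySem.Int.mod l n else 0) + 1).toNat (rr + 1)
              else [])
              ++ PySem.List.pyRange
                  (max (if rr = PySem.Int.floordiv l n then PySem.Int.mod l n else 0) (rr + 1) + 1)
                  ((if rr = PySem.Int.floordiv r n then PySem.Int.mod r n else n - 1) + 2) 1)) := by
      funext out rr
      dsimp only
      split_ifs <;> simp [List.append_assoc]
    dsimp only
    rw [hfun, PySem.List.foldl_append_eq_flatMap, List.nil_append]
    have hcg : ∀ rr ∈ PySem.List.pyRange (PySem.Int.floordiv l n) (PySem.Int.floordiv r n + 1) 1,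
        ((if min (if rr = PySem.Int.floordiv r n then PySem.Int.mod r n else n - 1) rr ≥
              (if rr = PySem.Int.floordiv l n then PySem.Int.mod l n else 0) then
            List.replicate (min (if rr = PySem.Int.floordiv r n then PySem.Int.mod r n else n - 1) rr
                - (if rr = PySem.Int.floordiv l n then PySem.Int.mod l n else 0) + 1).toNat (rr + 1)
          else [])
          ++ PySem.List.pyRange
              (max (if rr = PySem.Int.floordiv l n then PySem.Int.mod l n else 0) (rr + 1) + 1)
              ((if rr = PySem.Int.floordiv r n then PySem.Int.mod r n else n - 1) + 2) 1)
        = (fun rr => (PySem.List.pyRange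
            (rr * n + (if rr = PySem.Int.floordiv l n then PySem.Int.mod l n else 0))
            (rr * n + (if rr = PySem.Int.floordiv r n then PySem.Int.mod r n else n - 1) + 1) 1).map (pvCell n)) rr := by
      intro rr _
      exact row_eq n rr _ _ hn (by split_ifs <;> omega) (by split_ifs <;> omega)
    rw [List.flatMap_congr hcg]
    rw [PySem.List.pyRange_one_cons (by omega : PySem.Int.floordiv l n < PySem.Int.floordiv r n + 1),
        List.flatMap_cons]
    have hcg2 : ∀ rr ∈ PySem.List.pyRange (PySem.Int.floordiv l n + 1) (PySem.Int.floordiv r n + 1) 1,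
        (PySem.List.pyRange
            (rr * n + (if rr = PySem.Int.floordiv l n then PySem.Int.mod l n else 0))
            (rr * n + (if rr = PySem.Int.floordiv r n then PySem.Int.mod r n else n - 1) + 1) 1).map (pvCell n)
        = (fun rr => (PySem.List.pyRange (rr * n)
            (rr * n + (if rr = PySem.Int.floordiv r n then PySem.Int.mod r n else n - 1) + 1) 1).map (pvCell n)) rr := by
      intro rr hm
      rw [PySem.List.mem_pyRange_one] at hm
      rw [if_neg (by omega)]
      simp
    rw [List.flatMap_congr hcg2]
    rw [chain n (PySem.Int.floordiv r n) (PySem.Int.mod r n) hn hec.1 hec.2 _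
          (PySem.Int.floordiv l n + 1) rfl (by omega)]
    rw [if_pos rfl]
    by_cases hcase : PySem.Int.floordiv l n = PySem.Int.floordiv r n
    · rw [if_pos hcase]
      have hd : (PySem.Int.floordiv l n + 1) * n = PySem.Int.floordiv l n * n + n := by ring
      rw [PySem.List.pyRange_one_eq_nil
            (by rw [hcase] at hd ⊢; omega :
              PySem.Int.floordiv r n * n + PySem.Int.mod r n + 1 ≤ (PySem.Int.floordiv l n + 1) * n)]
      rw [show PySem.Int.floordiv l n * n + PySem.Int.mod l n = l from hl,
          show PySem.Int.floordiv l n * n + PySem.Int.mod r n + 1 = r + 1 by rw [hcase]; omega]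
      simp
    · rw [if_neg hcase]
      have hmul : (PySem.Int.floordiv l n + 1) * n ≤ PySem.Int.floordiv r n * n := by
        have := mul_le_mul_of_nonneg_right
          (by omega : PySem.Int.floordiv l n + 1 ≤ PySem.Int.floordiv r n) (le_of_lt hn)
        linarith
      have hd : (PySem.Int.floordiv l n + 1) * n = PySem.Int.floordiv l n * n + n := by ring
      rw [show PySem.Int.floordiv l n * n + PySem.Int.mod l n = l from hl,
          show PySem.Int.floordiv l n * n + (n - 1) + 1 = (PySem.Int.floordiv l n + 1) * n by ring,
          show PySem.Int.floordiv r n * n + PySem.Int.mod r n + 1 = r + 1 by omega]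
      rw [← List.map_append, ← PySem.List.pyRange_one_append l ((PySem.Int.floordiv l n + 1) * n) (r + 1)
            (by omega) (by omega)]

-- ===== VERDICT (by name: the statement is the Claim_ definition above) =====
theorem solution_spec : Claim_equal_solution := by
  intro n l r _ hn
  unfold Spec_solution
  rw [solution_eq_map n l r hn, solution_alt_eq_map n l r hn]
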